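-- pv_equiv track=rewrite | github.com/AMirandaCodes/Stanford-algorithms | 2-SUM algorithm/2-sum-targets-loop.py | twoSums_counter
-- ===== SOURCE A (Python) =====
-- def twoSums_counter(array, targets):
--     numbers = set(array)
--     valid_targets = set()
--
--     for x in numbers:
--         for t in targets:
--             y = t - x
--             if y != x and y in numbers:
--                 valid_targets.add(t)
--
--     return len(valid_targets)
-- ===== SOURCE B (Python) =====
-- def twoSums_counter(array, targets):
--     # Build the set of all sums of two distinct values first, then intersect with the targets.
--     nums = list(set(array))
--     sums = set()
--     while nums:
--         x = nums.pop(0)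
--         for y in nums:
--             sums.add(x + y)
--     return len(set(targets) & sums)
-- ===== Notes on version B (the rewrite author's own statement) =====
-- stated objective: alternative
-- what changed: B enumerates unordered pairs of distinct values once, collecting every achievable pairwise sum into a set, then returns the size of the intersection of that set with set(targets), instead of A's scan of all targets for every element; A's set-of-valid-targets accumulator disappears.
import Mathlib
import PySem

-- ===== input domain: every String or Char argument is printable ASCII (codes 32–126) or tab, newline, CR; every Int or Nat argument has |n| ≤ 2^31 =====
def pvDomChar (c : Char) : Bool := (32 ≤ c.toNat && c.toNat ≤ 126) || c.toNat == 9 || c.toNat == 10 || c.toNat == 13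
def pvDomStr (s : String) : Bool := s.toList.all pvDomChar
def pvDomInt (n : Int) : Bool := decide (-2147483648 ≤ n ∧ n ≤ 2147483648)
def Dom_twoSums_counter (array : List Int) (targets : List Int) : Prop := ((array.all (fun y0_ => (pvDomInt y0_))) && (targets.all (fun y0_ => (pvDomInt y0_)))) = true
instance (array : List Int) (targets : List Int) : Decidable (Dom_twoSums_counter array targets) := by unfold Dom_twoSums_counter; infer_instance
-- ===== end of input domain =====

-- B builds the set of pairwise sums of distinct values once and intersects it with set(targets),
-- instead of A's scan of all targets for every element (objective: alternative algorithm).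

-- ===== PORT A =====
def twoSums_counter (array : List Int) (targets : List Int) : Int :=
  let numbers : PySem.Set Int := PySem.Set.ofList array
  let valid : PySem.Set Int :=
    numbers.foldl (fun vt x =>
      targets.foldl (fun vt t =>
        if t - x ≠ x ∧ (t - x) ∈ numbers then PySem.Set.add vt t else vt) vt)
      PySem.Set.empty
  (valid.length : Int)

-- ===== PORT B =====
-- the 'while nums: x = nums.pop(0); for y in nums: sums.add(x + y)' loop of Source B
def pvSumsLoop (nums : List Int) (sums : PySem.Set Int) : PySem.Set Int :=
  match nums with
  | [] => sums
  | x :: rest => pvSumsLoop rest (rest.foldl (fun s y => PySem.Set.add s (x + y)) sums)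

def twoSums_counter_alt (array : List Int) (targets : List Int) : Int :=
  let sums : PySem.Set Int := pvSumsLoop (PySem.Set.ofList array) PySem.Set.empty
  ((PySem.Set.inter (PySem.Set.ofList targets) sums).length : Int)

-- ===== PRECONDITION & SPEC =====
def Spec_twoSums_counter (array : List Int) (targets : List Int) (out : Int) : Prop := out = twoSums_counter_alt array targets
instance (array : List Int) (targets : List Int) (out : Int) : Decidable (Spec_twoSums_counter array targets out) := by unfold Spec_twoSums_counter; infer_instance

-- ===== CLAIM (what is proved, stated in full; the proofs are below) =====
def Claim_equal_twoSums_counter : Prop := ∀ (array : List Int) (targets : List Int), Dom_twoSums_counter array targets → Spec_twoSums_counter array targets (twoSums_counter array targets)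

-- ===== LEMMAS AND PROOFS =====

-- "t is a valid target w.r.t. the distinct values l": some x in l has a partner t - x ≠ x in l
def pvGood (l : List Int) (t : Int) : Prop := ∃ x ∈ l, t - x ≠ x ∧ (t - x) ∈ l

theorem pvGood_step {x : Int} {rest : List Int} {t : Int} (hx : x ∉ rest) :
    ((∃ y ∈ rest, t = x + y) ∨ pvGood rest t) ↔ pvGood (x :: rest) t := by
  constructor
  · rintro (⟨y, hy, rfl⟩ | ⟨a, ha, hne, hb⟩)
    · exact ⟨x, List.mem_cons_self, by
        constructor
        · intro h
          have hyx : y = x := by omega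
          exact hx (hyx ▸ hy)
        · have : x + y - x = y := by ring
          rw [this]; exact List.mem_cons_of_mem _ hy⟩
    · exact ⟨a, List.mem_cons_of_mem _ ha, hne, List.mem_cons_of_mem _ hb⟩
  · rintro ⟨a, ha, hne, hb⟩
    rcases List.mem_cons.mp ha with rfl | ha'
    · rcases List.mem_cons.mp hb with h | hb'
      · exact absurd h hne
      · exact Or.inl ⟨t - a, hb', by ring⟩
    · rcases List.mem_cons.mp hb with h | hb'
      · exact Or.inl ⟨a, ha', by omega⟩
      · exact Or.inr ⟨a, ha', hne, hb'⟩

-- membership through Source B's sums loop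
theorem pvSumsLoop_mem (l : List Int) (s : PySem.Set Int) (hl : l.Nodup) (t : Int) :
    t ∈ pvSumsLoop l s ↔ t ∈ s ∨ pvGood l t := by
  induction l generalizing s with
  | nil => simp [pvSumsLoop, pvGood]
  | cons x rest ih =>
    rcases List.nodup_cons.mp hl with ⟨hx, hrest⟩
    rw [pvSumsLoop, ih _ hrest, PySem.Set.mem_foldl_add, ← pvGood_step hx]
    constructor
    · rintro (⟨h | ⟨y, hy, rfl⟩⟩ | h)
      · exact Or.inl h
      · exact Or.inr (Or.inl ⟨y, hy, rfl⟩)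
      · exact Or.inr (Or.inr h)
    · rintro (h | ⟨y, hy, rfl⟩ | h)
      · exact Or.inl (Or.inl h)
      · exact Or.inl (Or.inr ⟨y, hy, rfl⟩)
      · exact Or.inr h

-- A's inner loop over targets, rewritten as a fold of adds over a filter
theorem pvInner_mem (N : List Int) (targets : List Int) (x : Int) (vt : PySem.Set Int) (u : Int) :
    u ∈ targets.foldl (fun vt t => if t - x ≠ x ∧ (t - x) ∈ N then PySem.Set.add vt t else vt) vt
      ↔ u ∈ vt ∨ (u ∈ targets ∧ u - x ≠ x ∧ (u - x) ∈ N) := by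
  rw [PySem.List.foldl_ite_eq_foldl_filter]
  rw [PySem.Set.mem_foldl_add (f := fun t => t)]
  simp only [List.mem_filter, decide_eq_true_eq]
  constructor
  · rintro (h | ⟨b, ⟨hb, hc⟩, rfl⟩)
    · exact Or.inl h
    · exact Or.inr ⟨hb, hc⟩
  · rintro (h | ⟨hb, hc⟩)
    · exact Or.inl h
    · exact Or.inr ⟨u, ⟨hb, hc⟩, rfl⟩

theorem pvInner_nodup (N : List Int) (targets : List Int) (x : Int) (vt : PySem.Set Int) (h : vt.Nodup) :
    (targets.foldl (fun vt t => if t - x ≠ x ∧ (t - x) ∈ N then PySem.Set.add vt t else vt) vt).Nodup := by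
  induction targets generalizing vt with
  | nil => exact h
  | cons t ts ih =>
    simp only [List.foldl_cons]
    split
    · exact ih _ (PySem.Set.nodup_add _ _ h)
    · exact ih _ h

theorem pvOuter_mem (N : List Int) (targets : List Int) (l : List Int) (vt : PySem.Set Int) (u : Int) :
    u ∈ l.foldl (fun vt x =>
        targets.foldl (fun vt t => if t - x ≠ x ∧ (t - x) ∈ N then PySem.Set.add vt t else vt) vt) vt
      ↔ u ∈ vt ∨ (u ∈ targets ∧ ∃ x ∈ l, u - x ≠ x ∧ (u - x) ∈ N) := by
  induction l generalizing vt with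
  | nil => simp
  | cons x xs ih =>
    simp only [List.foldl_cons]
    rw [ih, pvInner_mem]
    constructor
    · rintro (⟨h | ⟨hu, hx⟩⟩ | ⟨hu, a, ha, hgood⟩)
      · exact Or.inl h
      · exact Or.inr ⟨hu, x, List.mem_cons_self, hx⟩
      · exact Or.inr ⟨hu, a, List.mem_cons_of_mem _ ha, hgood⟩
    · rintro (h | ⟨hu, a, ha, hgood⟩)
      · exact Or.inl (Or.inl h)
      · rcases List.mem_cons.mp ha with rfl | ha'
        · exact Or.inl (Or.inr ⟨hu, hgood⟩)
        · exact Or.inr ⟨hu, a, ha', hgood⟩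

theorem pvOuter_nodup (N : List Int) (targets : List Int) (l : List Int) (vt : PySem.Set Int) (h : vt.Nodup) :
    (l.foldl (fun vt x =>
        targets.foldl (fun vt t => if t - x ≠ x ∧ (t - x) ∈ N then PySem.Set.add vt t else vt) vt) vt).Nodup := by
  induction l generalizing vt with
  | nil => exact h
  | cons x xs ih => exact ih _ (pvInner_nodup N targets x vt h)

-- ===== VERDICT (by name: the statement is the Claim_ definition above) =====
theorem twoSums_counter_spec : Claim_equal_twoSums_counter := by
  intro array targets _
  unfold Spec_twoSums_counter twoSums_counter twoSums_counter_alt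
  simp only []
  set N : PySem.Set Int := PySem.Set.ofList array with hN
  have hNnd : N.Nodup := PySem.Set.nodup_ofList array
  set valid := N.foldl (fun vt x =>
      targets.foldl (fun vt t => if t - x ≠ x ∧ (t - x) ∈ N then PySem.Set.add vt t else vt) vt)
      PySem.Set.empty with hvalid
  set inter := PySem.Set.inter (PySem.Set.ofList targets) (pvSumsLoop N PySem.Set.empty) with hinter
  have hmem : ∀ u, u ∈ valid ↔ u ∈ inter := by
    intro u
    rw [hvalid, pvOuter_mem, hinter, PySem.Set.mem_inter, PySem.Set.mem_ofList,
      pvSumsLoop_mem N PySem.Set.empty hNnd]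
    simp only [PySem.Set.empty, List.not_mem_nil, false_or]
    unfold pvGood
    tauto
  have hperm : valid.Perm inter := by
    rw [List.perm_ext_iff_of_nodup
      (pvOuter_nodup N targets N PySem.Set.empty List.nodup_nil)
      (PySem.Set.nodup_inter _ _ (PySem.Set.nodup_ofList targets))]
    exact hmem
  exact_mod_cast hperm.length_eq
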